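-- pv_equiv track=rewrite | github.com/jl0up/magstab | src/magstab/misc/dac_via_rp_old.py | tuple_to_code
-- ===== SOURCE A (Python) =====
-- def tuple_to_code(t: tuple, word_length=8) -> int:
--     '''Converts a tuple of words to a code (integer)
--     '''
--     try:
--         assert isinstance(t, tuple)
--         for _ in t:
--             assert isinstance(_, int)
--             assert 0 <= _ < 2**word_length
--     except:
--         raise
--     else:
--         return sum([ x << (word_length*i) for i,x in enumerate(t[::-1]) ])
-- ===== SOURCE B (Python) =====
-- def tuple_to_code(t: tuple, word_length=8) -> int:
--     '''Converts a tuple of words to a code (integer)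
--     '''
--     try:
--         assert isinstance(t, tuple)
--         for _ in t:
--             assert isinstance(_, int)
--             assert 0 <= _ < 2**word_length
--     except:
--         raise
--     else:
--         code = 0
--         for x in t:
--             code = code * 2**word_length + x
--         return code
-- ===== Notes on version B (the rewrite author's own statement) =====
-- stated objective: simpler
-- what changed: The reversed-enumerate list comprehension summing independently shifted terms is replaced by a single forward Horner accumulator (code = code * 2**word_length + x), dropping the t[::-1] reversal, enumerate, the intermediate list and the per-element shift.
-- outside the precondition, e.g. on tuple_to_code((0,), -3): A returns 0, B returns 0.0
import Mathlib
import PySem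

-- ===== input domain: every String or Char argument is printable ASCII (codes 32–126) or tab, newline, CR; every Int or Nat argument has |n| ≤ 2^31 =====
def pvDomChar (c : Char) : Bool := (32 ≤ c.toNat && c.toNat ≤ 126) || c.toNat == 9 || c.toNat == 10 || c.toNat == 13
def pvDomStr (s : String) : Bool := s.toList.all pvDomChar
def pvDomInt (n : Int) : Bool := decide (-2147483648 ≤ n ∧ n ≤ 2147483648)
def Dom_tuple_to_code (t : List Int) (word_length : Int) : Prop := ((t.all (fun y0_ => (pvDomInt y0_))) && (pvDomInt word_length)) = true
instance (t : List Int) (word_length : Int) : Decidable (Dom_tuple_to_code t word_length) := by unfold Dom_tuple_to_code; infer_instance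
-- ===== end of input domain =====

-- B replaces A's reversed-enumerate shifted sum by a forward Horner accumulator: simpler, same O(n) pass.


-- ===== PORT A =====
-- The validation try/except either passes or raises (AssertionError); inputs on which it
-- raises, and the negative-shift ValueError of 'x << (word_length*i)', lie outside
-- Pre_tuple_to_code, so the asserts contribute nothing to the returned value here.
-- 'x << k' (k ≥ 0 under Pre_) is ported as x * 2 ^ k with k = (word_length*i).toNat.
def tuple_to_code (t : List Int) (word_length : Int) : Int :=
  ((PySem.List.enumerate t.reverse 0).map
      (fun p => p.2 * 2 ^ (word_length * p.1).toNat)).sum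

-- ===== PORT B =====
-- Same validation (raises exactly where A's does, outside Pre_); then a forward Horner loop:
-- code = code * 2**word_length + x.  2 ** word_length is an int exactly when word_length ≥ 0
-- (guaranteed by Pre_ for nonempty t), ported as 2 ^ word_length.toNat.
def tuple_to_code_alt (t : List Int) (word_length : Int) : Int :=
  t.foldl (fun code x => code * 2 ^ word_length.toNat + x) 0

-- ===== PRECONDITION & SPEC =====
-- Pre_ excludes exactly the inputs on which the Python raises: an element out of
-- [0, 2**word_length) fails the assert, and a negative word_length with a nonempty tuple
-- leaves the int domain (2**word_length is a float; shifts by it raise ValueError) — there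
-- A returns an int only on the degenerate one-element-zero corner (see the cite) where B's
-- arithmetic yields the float 0.0.  The '32 ≤ word_length' disjunct only short-circuits the
-- bound for huge word_length (every |x| ≤ 2^31 in Dom satisfies it); it keeps Pre_ computable.
def Pre_tuple_to_code (t : List Int) (word_length : Int) : Prop :=
  ∀ x ∈ t, 0 ≤ x ∧ 0 ≤ word_length ∧ (32 ≤ word_length ∨ x < 2 ^ word_length.toNat)
instance (t : List Int) (word_length : Int) : Decidable (Pre_tuple_to_code t word_length) := by
  unfold Pre_tuple_to_code; infer_instance

def pvWitness_tuple_to_code : List Int × Int := ([1, 2, 3], 8)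

def Spec_tuple_to_code (t : List Int) (word_length : Int) (out : Int) : Prop := out = tuple_to_code_alt t word_length
instance (t : List Int) (word_length : Int) (out : Int) : Decidable (Spec_tuple_to_code t word_length out) := by unfold Spec_tuple_to_code; infer_instance

-- ===== CLAIM (what is proved, stated in full; the proofs are below) =====
def Claim_equal_tuple_to_code : Prop := ∀ (t : List Int) (word_length : Int), Dom_tuple_to_code t word_length → Pre_tuple_to_code t word_length → Spec_tuple_to_code t word_length (tuple_to_code t word_length)

-- ===== LEMMAS AND PROOFS =====

-- little-endian polynomial value of a word list
def pvPoly (b : Int) : List Int → Int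
  | [] => 0
  | x :: l => x + b * pvPoly b l

theorem pv_toNat_mul (wl : Int) (i : Int) (hi : 0 ≤ i) :
    (wl * i).toNat = wl.toNat * i.toNat := by
  by_cases h : 0 ≤ wl
  · rw [Int.toNat_mul h hi]
  · push Not at h
    have h1 : wl * i ≤ 0 := mul_nonpos_of_nonpos_of_nonneg h.le hi
    have h2 : wl.toNat = 0 := by omega
    simp [Int.toNat_of_nonpos h1, h2]

theorem pv_enumerate_sum (b : Int) (l : List Int) :
    ∀ s : Int, 0 ≤ s →
      ((PySem.List.enumerate l s).map (fun p => p.2 * b ^ p.1.toNat)).sum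
        = b ^ s.toNat * pvPoly b l := by
  induction l with
  | nil => intro s _; simp [PySem.List.enumerate_nil, pvPoly]
  | cons x l ih =>
      intro s hs
      rw [PySem.List.enumerate_cons]
      have h1 : (s + 1).toNat = s.toNat + 1 := by omega
      simp only [List.map_cons, List.sum_cons, ih (s + 1) (by omega), h1, pvPoly]
      ring

theorem pv_poly_append (b : Int) (m : List Int) (x : Int) :
    pvPoly b (m ++ [x]) = pvPoly b m + x * b ^ m.length := by
  induction m with
  | nil => simp [pvPoly]
  | cons y m ih => simp [pvPoly, ih]; ring

theorem pv_horner (b : Int) (l : List Int) :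
    ∀ a : Int, l.foldl (fun code x => code * b + x) a
      = a * b ^ l.length + pvPoly b l.reverse := by
  induction l with
  | nil => intro a; simp [pvPoly]
  | cons x l ih =>
      intro a
      simp only [List.foldl_cons, ih, List.reverse_cons, pv_poly_append,
        List.length_reverse, List.length_cons]
      ring

-- ===== VERDICT (by name: the statement is the Claim_ definition above) =====
theorem tuple_to_code_spec : Claim_equal_tuple_to_code := by
  intro t wl _ _
  unfold Spec_tuple_to_code tuple_to_code tuple_to_code_alt
  have hmap : ((PySem.List.enumerate t.reverse 0).map
      (fun p => p.2 * 2 ^ (wl * p.1).toNat)).sum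
      = ((PySem.List.enumerate t.reverse 0).map
      (fun p => p.2 * (2 : Int) ^ (wl.toNat * p.1.toNat))).sum := by
    congr 1
    apply List.map_congr_left
    intro p hp
    rcases (PySem.List.mem_enumerate_iff _ _ _).mp hp with ⟨k, hk, rfl⟩
    have : ((0 : Int) + k) = (k : Int) := by omega
    rw [pv_toNat_mul wl _ (by omega)]
  rw [hmap, pv_horner]
  have h0 := pv_enumerate_sum (2 ^ wl.toNat : Int) t.reverse 0 le_rfl
  simp only [Int.toNat_zero, pow_zero, one_mul, ← pow_mul] at h0
  rw [h0, zero_mul, zero_add]
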